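-- pv_equiv track=rewrite | github.com/ljw20180420/rearr | bench/tools/ARRANGE_RESULTS.py | coor2indel
-- ===== SOURCE A (Python) =====
-- def coor2indel(refcoor, seqcoor, cut):
--     segs = []
--     for i in range(len(refcoor) - 1):
--         if refcoor[i + 1] > refcoor[i] and seqcoor[i + 1] > seqcoor[i]:
--             segs.append([refcoor[i], refcoor[i+1], seqcoor[i], seqcoor[i+1]])
--     indels = []
--     for i in range(len(segs) - 1):
--         indels.append([segs[i][1], segs[i+1][0], segs[i][3], segs[i+1][2]])
--     if not indels:
--         seqpos = segs[0][2] + cut - segs[0][0]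
--         indels.append([cut, cut, seqpos, seqpos])
--     return indels
-- ===== SOURCE B (Python) =====
-- def coor2indel(refcoor, seqcoor, cut):
--     # One fused pass: keep only the previous valid segment (and the first one
--     # for the empty-indels fallback) instead of building the full segs table
--     # and re-scanning it.
--     indels = []
--     first = prev = None
--     for i in range(len(refcoor) - 1):
--         if refcoor[i + 1] > refcoor[i] and seqcoor[i + 1] > seqcoor[i]:
--             cur = (refcoor[i], refcoor[i + 1], seqcoor[i], seqcoor[i + 1])
--             if prev is not None:
--                 indels.append([prev[1], cur[0], prev[3], cur[2]])
--             else: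
--                 first = cur
--             prev = cur
--     if not indels:
--         seqpos = first[2] + cut - first[0]
--         indels.append([cut, cut, seqpos, seqpos])
--     return indels
-- ===== Notes on version B (the rewrite author's own statement) =====
-- stated objective: alternative
-- what changed: B fuses A's two loops into one pass that keeps only the previous valid segment (plus the first one for the fallback) and emits each indel immediately, instead of materialising the whole segs table and re-scanning it by index.
import Mathlib
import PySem

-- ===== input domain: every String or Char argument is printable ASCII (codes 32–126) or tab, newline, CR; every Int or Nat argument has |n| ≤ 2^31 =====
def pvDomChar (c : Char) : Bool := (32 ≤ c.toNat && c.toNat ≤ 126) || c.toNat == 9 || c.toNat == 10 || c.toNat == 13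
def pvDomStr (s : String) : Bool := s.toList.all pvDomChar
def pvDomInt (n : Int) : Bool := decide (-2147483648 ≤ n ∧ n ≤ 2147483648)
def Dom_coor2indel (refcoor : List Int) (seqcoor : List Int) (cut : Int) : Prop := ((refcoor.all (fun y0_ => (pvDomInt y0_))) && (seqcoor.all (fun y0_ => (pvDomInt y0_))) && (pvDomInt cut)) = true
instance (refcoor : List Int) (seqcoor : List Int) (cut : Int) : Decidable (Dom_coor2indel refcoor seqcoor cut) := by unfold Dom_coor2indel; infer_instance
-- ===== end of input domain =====

-- B fuses A's two loops into one pass keeping only the previous valid segment (same O(n) cost, no segs table).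


-- ===== PORT A =====
-- literal transliteration of A: build the segs table (first loop), then a second indexed
-- loop over it; each loop is its own helper def. List.getD is used for the subscripts;
-- inside Pre_ every subscript A evaluates is in range, so getD is exact there
-- (out-of-range subscripts raise IndexError in Python and are outside Pre_).

-- A's first loop: segs
def coor2indelSegs (refcoor : List Int) (seqcoor : List Int) : List (List Int) :=
  (List.range (refcoor.length - 1)).foldl (fun segs i =>
    if refcoor.getD (i+1) 0 > refcoor.getD i 0 ∧ seqcoor.getD (i+1) 0 > seqcoor.getD i 0 then
      segs ++ [[refcoor.getD i 0, refcoor.getD (i+1) 0, seqcoor.getD i 0, seqcoor.getD (i+1) 0]]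
    else segs) []

-- A's second loop: indels from consecutive segs
def coor2indelIndels (segs : List (List Int)) : List (List Int) :=
  (List.range (segs.length - 1)).foldl (fun indels i =>
    indels ++ [[(segs.getD i []).getD 1 0, (segs.getD (i+1) []).getD 0 0,
                (segs.getD i []).getD 3 0, (segs.getD (i+1) []).getD 2 0]]) []

def coor2indel (refcoor : List Int) (seqcoor : List Int) (cut : Int) : List (List Int) :=
  if coor2indelIndels (coor2indelSegs refcoor seqcoor) = [] then
    -- segs[0] raises IndexError in Python when segs = []; such inputs are outside Pre_
    [[cut, cut,
      ((coor2indelSegs refcoor seqcoor).getD 0 []).getD 2 0 + cut - ((coor2indelSegs refcoor seqcoor).getD 0 []).getD 0 0,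
      ((coor2indelSegs refcoor seqcoor).getD 0 []).getD 2 0 + cut - ((coor2indelSegs refcoor seqcoor).getD 0 []).getD 0 0]]
  else coor2indelIndels (coor2indelSegs refcoor seqcoor)

-- ===== PORT B =====
-- literal transliteration of B: one fold carrying (indels, first, prev).
def coor2indelScan (refcoor : List Int) (seqcoor : List Int) :
    List (List Int) × Option (Int × Int × Int × Int) × Option (Int × Int × Int × Int) :=
  (List.range (refcoor.length - 1)).foldl
    (fun (st : List (List Int) × Option (Int × Int × Int × Int) × Option (Int × Int × Int × Int)) i =>
      if refcoor.getD (i+1) 0 > refcoor.getD i 0 ∧ seqcoor.getD (i+1) 0 > seqcoor.getD i 0 then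
        let cur := (refcoor.getD i 0, refcoor.getD (i+1) 0, seqcoor.getD i 0, seqcoor.getD (i+1) 0)
        match st.2.2 with
        | some p => (st.1 ++ [[p.2.1, cur.1, p.2.2.2, cur.2.2.1]], st.2.1, some cur)
        | none => (st.1, some cur, some cur)
      else st) ([], none, none)

def coor2indel_alt (refcoor : List Int) (seqcoor : List Int) (cut : Int) : List (List Int) :=
  match coor2indelScan refcoor seqcoor with
  | (indels, first, _) =>
    if indels = [] then
      match first with
      | some f => [[cut, cut, f.2.2.1 + cut - f.1, f.2.2.1 + cut - f.1]]
      | none => []   -- first[2] on first = None raises TypeError in Python B; outside Pre_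
    else indels

-- ===== PRECONDITION & SPEC =====
-- Pre_ is exactly the set of inputs on which Python A returns: every seqcoor subscript the
-- loop actually evaluates is in range (else IndexError), and at least one valid segment
-- exists (else the fallback's segs[0] raises IndexError).
def Pre_coor2indel (refcoor : List Int) (seqcoor : List Int) (cut : Int) : Prop :=
  (∀ i < refcoor.length, i + 1 < refcoor.length →
      refcoor.getD (i+1) 0 > refcoor.getD i 0 → i + 1 < seqcoor.length) ∧
  (∃ i < refcoor.length, i + 1 < refcoor.length ∧ i + 1 < seqcoor.length ∧
      refcoor.getD (i+1) 0 > refcoor.getD i 0 ∧ seqcoor.getD (i+1) 0 > seqcoor.getD i 0)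
instance (refcoor : List Int) (seqcoor : List Int) (cut : Int) : Decidable (Pre_coor2indel refcoor seqcoor cut) := by unfold Pre_coor2indel; infer_instance

def pvWitness_coor2indel : List Int × List Int × Int := ([0, 3], [1, 2], 2)

def Spec_coor2indel (refcoor : List Int) (seqcoor : List Int) (cut : Int) (out : List (List Int)) : Prop := out = coor2indel_alt refcoor seqcoor cut
instance (refcoor : List Int) (seqcoor : List Int) (cut : Int) (out : List (List Int)) : Decidable (Spec_coor2indel refcoor seqcoor cut out) := by unfold Spec_coor2indel; infer_instance

-- ===== CLAIM (what is proved, stated in full; the proofs are below) =====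
def Claim_equal_coor2indel : Prop := ∀ (refcoor : List Int) (seqcoor : List Int) (cut : Int), Dom_coor2indel refcoor seqcoor cut → Pre_coor2indel refcoor seqcoor cut → Spec_coor2indel refcoor seqcoor cut (coor2indel refcoor seqcoor cut)

-- ===== LEMMAS AND PROOFS =====

def pvSeg (r s : List Int) (i : Nat) : Int × Int × Int × Int :=
  (r.getD i 0, r.getD (i+1) 0, s.getD i 0, s.getD (i+1) 0)

def pvValid (r s : List Int) (i : Nat) : Bool :=
  decide (r.getD (i+1) 0 > r.getD i 0 ∧ s.getD (i+1) 0 > s.getD i 0)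

def pvSegsOf (r s : List Int) (l : List Nat) : List (Int × Int × Int × Int) :=
  (l.filter (pvValid r s)).map (pvSeg r s)

def pvToList (p : Int × Int × Int × Int) : List Int := [p.1, p.2.1, p.2.2.1, p.2.2.2]

def pvLink (p q : Int × Int × Int × Int) : List Int := [p.2.1, q.1, p.2.2.2, q.2.2.1]

def pvLinks (p : Int × Int × Int × Int) : List (Int × Int × Int × Int) → List (List Int)
  | [] => []
  | q :: t => pvLink p q :: pvLinks q t

theorem pvSegsOf_nil (r s : List Int) : pvSegsOf r s [] = [] := rfl

theorem pvSegsOf_cons_pos (r s : List Int) (i : Nat) (t : List Nat)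
    (h : r.getD (i+1) 0 > r.getD i 0 ∧ s.getD (i+1) 0 > s.getD i 0) :
    pvSegsOf r s (i :: t) = pvSeg r s i :: pvSegsOf r s t := by
  have hv : pvValid r s i = true := decide_eq_true h
  simp [pvSegsOf, hv]

theorem pvSegsOf_cons_neg (r s : List Int) (i : Nat) (t : List Nat)
    (h : ¬ (r.getD (i+1) 0 > r.getD i 0 ∧ s.getD (i+1) 0 > s.getD i 0)) :
    pvSegsOf r s (i :: t) = pvSegsOf r s t := by
  have hv : pvValid r s i = false := decide_eq_false h
  simp [pvSegsOf, hv]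

-- A's first loop builds the filtered-and-mapped segs table
theorem pvA1aux (r s : List Int) : ∀ (l : List Nat) (acc : List (List Int)),
    l.foldl (fun segs i =>
      if r.getD (i+1) 0 > r.getD i 0 ∧ s.getD (i+1) 0 > s.getD i 0 then
        segs ++ [[r.getD i 0, r.getD (i+1) 0, s.getD i 0, s.getD (i+1) 0]]
      else segs) acc
    = acc ++ (pvSegsOf r s l).map pvToList := by
  intro l
  induction l with
  | nil => intro acc; simp [pvSegsOf_nil]
  | cons i t ih =>
    intro acc
    rw [List.foldl_cons]
    by_cases h : r.getD (i+1) 0 > r.getD i 0 ∧ s.getD (i+1) 0 > s.getD i 0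
    · rw [if_pos h, ih, pvSegsOf_cons_pos r s i t h]
      simp [pvSeg, pvToList]
    · rw [if_neg h, ih, pvSegsOf_cons_neg r s i t h]

theorem pvA1 (r s : List Int) :
    coor2indelSegs r s = (pvSegsOf r s (List.range (r.length - 1))).map pvToList := by
  unfold coor2indelSegs
  rw [pvA1aux r s (List.range (r.length - 1)) []]
  simp

-- a plain "append in a loop" fold is a map-flatten
theorem pvFoldMap {α β : Type} (f : α → List β) : ∀ (l : List α) (acc : List β),
    l.foldl (fun a i => a ++ f i) acc = acc ++ (l.map f).flatten := by
  intro l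
  induction l with
  | nil => intro acc; simp
  | cons x t ih => intro acc; simp [ih]

-- indexed consecutive pairs of a list, structurally
def pvPairs {α : Type} : List α → List (α × α)
  | a :: b :: t => (a, b) :: pvPairs (b :: t)
  | _ => []

theorem pvPairs_getD {α : Type} (d : α) : ∀ (l : List α),
    (List.range (l.length - 1)).map (fun i => (l.getD i d, l.getD (i+1) d)) = pvPairs l := by
  intro l
  induction l with
  | nil => simp [pvPairs]
  | cons a t ih =>
    cases t with
    | nil => simp [pvPairs]
    | cons b t' =>
      have h : (a :: b :: t').length - 1 = (b :: t').length - 1 + 1 := by simp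
      rw [h, List.range_succ_eq_map]
      simp only [List.map_cons, List.map_map]
      rw [show (fun i => ((a :: b :: t').getD i d, (a :: b :: t').getD (i+1) d)) ∘ (· + 1)
            = (fun i => ((b :: t').getD i d, (b :: t').getD (i+1) d)) from rfl]
      rw [ih]
      simp [pvPairs]

theorem pvPairs_map {α β : Type} (f : α → β) : ∀ (l : List α),
    pvPairs (l.map f) = (pvPairs l).map (fun x => (f x.1, f x.2)) := by
  intro l
  induction l with
  | nil => simp [pvPairs]
  | cons a t ih =>
    cases t with
    | nil => simp [pvPairs]
    | cons b t' => simp only [List.map_cons, pvPairs] at *; simp [ih]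

theorem pvPairs_links (p : Int × Int × Int × Int) : ∀ (t : List (Int × Int × Int × Int)),
    (pvPairs (p :: t)).map (fun x => pvLink x.1 x.2) = pvLinks p t := by
  intro t
  induction t generalizing p with
  | nil => simp [pvPairs, pvLinks]
  | cons q t' ih => simp [pvPairs, pvLinks, ih]

-- A's second loop over the segs table equals pvLinks over the tuple segs
theorem pvA2 (s0 : Int × Int × Int × Int) (rest : List (Int × Int × Int × Int)) :
    coor2indelIndels ((s0 :: rest).map pvToList) = pvLinks s0 rest := by
  unfold coor2indelIndels
  rw [pvFoldMap (fun i => [[(((s0 :: rest).map pvToList).getD i []).getD 1 0,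
        (((s0 :: rest).map pvToList).getD (i+1) []).getD 0 0,
        (((s0 :: rest).map pvToList).getD i []).getD 3 0,
        (((s0 :: rest).map pvToList).getD (i+1) []).getD 2 0]])]
  have h1 : (List.range (((s0 :: rest).map pvToList).length - 1)).map (fun i =>
      [[(((s0 :: rest).map pvToList).getD i []).getD 1 0, (((s0 :: rest).map pvToList).getD (i+1) []).getD 0 0,
        (((s0 :: rest).map pvToList).getD i []).getD 3 0, (((s0 :: rest).map pvToList).getD (i+1) []).getD 2 0]])
      = ((List.range (((s0 :: rest).map pvToList).length - 1)).map
          (fun i => (((s0 :: rest).map pvToList).getD i [], ((s0 :: rest).map pvToList).getD (i+1) []))).map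
          (fun x => [[x.1.getD 1 0, x.2.getD 0 0, x.1.getD 3 0, x.2.getD 2 0]]) := by
    rw [List.map_map]; rfl
  rw [h1, pvPairs_getD ([] : List Int) ((s0 :: rest).map pvToList), pvPairs_map pvToList]
  rw [← pvPairs_links s0 rest]
  have h2 : ∀ pl : List ((Int × Int × Int × Int) × (Int × Int × Int × Int)),
      ((pl.map (fun x => (pvToList x.1, pvToList x.2))).map
          (fun x => [[x.1.getD 1 0, x.2.getD 0 0, x.1.getD 3 0, x.2.getD 2 0]])).flatten
      = pl.map (fun x => pvLink x.1 x.2) := by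
    intro pl
    induction pl with
    | nil => rfl
    | cons x t ih => simp only [List.map_cons, List.flatten_cons, ih]; simp [pvToList, pvLink]
  rw [← h2 (pvPairs (s0 :: rest))]
  simp

-- the step function of B's fold
def pvBStep (r s : List Int)
    (st : List (List Int) × Option (Int × Int × Int × Int) × Option (Int × Int × Int × Int))
    (i : Nat) : List (List Int) × Option (Int × Int × Int × Int) × Option (Int × Int × Int × Int) :=
  if r.getD (i+1) 0 > r.getD i 0 ∧ s.getD (i+1) 0 > s.getD i 0 then
    let cur := (r.getD i 0, r.getD (i+1) 0, s.getD i 0, s.getD (i+1) 0)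
    match st.2.2 with
    | some p => (st.1 ++ [[p.2.1, cur.1, p.2.2.2, cur.2.2.1]], st.2.1, some cur)
    | none => (st.1, some cur, some cur)
  else st

theorem pvLastD {α : Type} (a d : α) (l : List α) :
    (a :: l).getLast?.getD d = l.getLast?.getD a := by
  induction l generalizing a with
  | nil => rfl
  | cons b t ih => rw [List.getLast?_cons_cons]; exact (ih b).symm ▸ rfl

theorem pvB1 (r s : List Int) : ∀ (l : List Nat) (ind : List (List Int))
    (f : Option (Int × Int × Int × Int)) (p : Int × Int × Int × Int),
    l.foldl (pvBStep r s) (ind, f, some p)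
      = (ind ++ pvLinks p (pvSegsOf r s l), f, some ((pvSegsOf r s l).getLastD p)) := by
  intro l
  induction l with
  | nil => intro ind f p; simp [pvSegsOf_nil, pvLinks]
  | cons i t ih =>
    intro ind f p
    rw [List.foldl_cons]
    by_cases h : r.getD (i+1) 0 > r.getD i 0 ∧ s.getD (i+1) 0 > s.getD i 0
    · have hstep : pvBStep r s (ind, f, some p) i
          = (ind ++ [pvLink p (pvSeg r s i)], f, some (pvSeg r s i)) := by
        unfold pvBStep
        rw [if_pos h]
        rfl
      rw [hstep, ih, pvSegsOf_cons_pos r s i t h]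
      simp [pvLinks, pvLastD]
    · have hstep : pvBStep r s (ind, f, some p) i = (ind, f, some p) := by
        unfold pvBStep
        rw [if_neg h]
      rw [hstep, ih, pvSegsOf_cons_neg r s i t h]

theorem pvB0aux (r s : List Int) : ∀ (l : List Nat),
    l.foldl (pvBStep r s) ([], none, none)
      = (match pvSegsOf r s l with
         | [] => (([] : List (List Int)), none, none)
         | s0 :: rest => (pvLinks s0 rest, some s0, some (rest.getLastD s0))) := by
  intro l
  induction l with
  | nil => simp [pvSegsOf_nil]
  | cons i t ih =>
    rw [List.foldl_cons]
    by_cases h : r.getD (i+1) 0 > r.getD i 0 ∧ s.getD (i+1) 0 > s.getD i 0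
    · have hstep : pvBStep r s ([], none, none) i = ([], some (pvSeg r s i), some (pvSeg r s i)) := by
        unfold pvBStep
        rw [if_pos h]
        rfl
      rw [hstep, pvB1 r s t, pvSegsOf_cons_pos r s i t h]
      simp
    · have hstep : pvBStep r s ([], none, none) i = ([], none, none) := by
        unfold pvBStep
        rw [if_neg h]
      rw [hstep, ih, pvSegsOf_cons_neg r s i t h]

theorem pvB0 (r s : List Int) :
    coor2indelScan r s
      = (match pvSegsOf r s (List.range (r.length - 1)) with
         | [] => (([] : List (List Int)), none, none)
         | s0 :: rest => (pvLinks s0 rest, some s0, some (rest.getLastD s0))) := by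
  unfold coor2indelScan
  rw [show (fun (st : List (List Int) × Option (Int × Int × Int × Int) × Option (Int × Int × Int × Int)) (i : Nat) =>
        if r.getD (i+1) 0 > r.getD i 0 ∧ s.getD (i+1) 0 > s.getD i 0 then
          let cur := (r.getD i 0, r.getD (i+1) 0, s.getD i 0, s.getD (i+1) 0)
          match st.2.2 with
          | some p => (st.1 ++ [[p.2.1, cur.1, p.2.2.2, cur.2.2.1]], st.2.1, some cur)
          | none => (st.1, some cur, some cur)
        else st) = pvBStep r s from rfl]
  exact pvB0aux r s (List.range (r.length - 1))

-- Pre_ gives a valid index, hence a nonempty segs list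
theorem pvSegs_ne (r s : List Int)
    (h : ∃ i < r.length, i + 1 < r.length ∧ i + 1 < s.length ∧
          r.getD (i+1) 0 > r.getD i 0 ∧ s.getD (i+1) 0 > s.getD i 0) :
    pvSegsOf r s (List.range (r.length - 1)) ≠ [] := by
  obtain ⟨i, _, hi1, _, hr, hs⟩ := h
  have hmem : i ∈ (List.range (r.length - 1)).filter (pvValid r s) := by
    rw [List.mem_filter]
    exact ⟨List.mem_range.mpr (by omega), decide_eq_true ⟨hr, hs⟩⟩
  simp only [pvSegsOf]
  intro hnil
  rw [List.map_eq_nil_iff] at hnil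
  rw [hnil] at hmem
  exact absurd hmem (List.not_mem_nil)

-- ===== VERDICT (by name: the statement is the Claim_ definition above) =====
theorem coor2indel_spec : Claim_equal_coor2indel := by
  intro r s cut _ hpre
  obtain ⟨-, hex⟩ := hpre
  have hne := pvSegs_ne r s hex
  unfold Spec_coor2indel coor2indel coor2indel_alt
  rw [pvA1 r s, pvB0 r s]
  cases hsegs : pvSegsOf r s (List.range (r.length - 1)) with
  | nil => exact absurd hsegs hne
  | cons s0 rest =>
    rw [pvA2 s0 rest]
    cases rest with
    | nil => simp [pvLinks, pvToList]
    | cons q t => simp [pvLinks]
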